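-- pv_equiv track=rewrite | github.com/miladtoutounchian/pythonalg | Influencer Tagging/restful_api_tagging.py | refine_list
-- ===== SOURCE A (Python) =====
-- def refine_list(lst, ls):
--     l = lst
--     A = []
--     for e in l:
--         if e in ls:
--             ind = l.index(e)
--             A.append(ind)
--     return [l[i] for i in range(len(l)) if i not in A]
-- ===== SOURCE B (Python) =====
-- def refine_list(lst, ls):
--     targets = set(ls)
--     removed = set()
--     out = []
--     for e in lst:
--         if e in targets and e not in removed:
--             removed.add(e)
--         else:
--             out.append(e)
--     return out
-- ===== Notes on version B (the rewrite author's own statement) =====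
-- stated objective: faster
-- what changed: One pass with a set of already-removed values replaces A's index-collection pass (which calls lst.index per element) plus a second index-filtering comprehension.
import Mathlib
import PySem

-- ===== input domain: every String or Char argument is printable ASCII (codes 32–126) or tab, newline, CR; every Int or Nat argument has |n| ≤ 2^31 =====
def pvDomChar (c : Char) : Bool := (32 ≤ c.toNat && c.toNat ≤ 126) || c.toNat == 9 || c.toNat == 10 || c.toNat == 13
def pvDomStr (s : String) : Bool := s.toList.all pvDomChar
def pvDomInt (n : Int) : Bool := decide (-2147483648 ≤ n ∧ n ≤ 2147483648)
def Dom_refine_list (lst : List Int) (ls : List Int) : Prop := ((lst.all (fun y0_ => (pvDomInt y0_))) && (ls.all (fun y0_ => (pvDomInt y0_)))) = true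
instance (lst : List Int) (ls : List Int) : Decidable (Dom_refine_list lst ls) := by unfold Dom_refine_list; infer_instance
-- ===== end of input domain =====

-- B removes, in one pass, the first occurrence of each value of ls using a set of
-- already-removed values, instead of A's per-element lst.index scan plus a second
-- index-filtering comprehension.

-- ===== PORT A =====
-- `l.index(e)` never raises here since e comes from l; the `.getD 0` default is unreachable.
def refine_list (lst : List Int) (ls : List Int) : List Int :=
  let A : List Int := lst.foldl
    (fun acc e => if e ∈ ls then acc ++ [(((PySem.List.index? lst e).getD 0 : Nat) : Int)] else acc) []
  (PySem.List.pyRange 0 (lst.length : Int) 1).foldl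
    (fun out i => if i ∈ A then out else out ++ [PySem.List.pyGetD lst i 0]) []

-- ===== PORT B =====
def refine_list_alt (lst : List Int) (ls : List Int) : List Int :=
  let targets : PySem.Set Int := PySem.Set.ofList ls
  (lst.foldl
    (fun (st : PySem.Set Int × List Int) e =>
      if e ∈ targets ∧ e ∉ st.1 then (PySem.Set.add st.1 e, st.2)
      else (st.1, st.2 ++ [e]))
    (PySem.Set.empty, [])).2

-- ===== PRECONDITION & SPEC =====
def Spec_refine_list (lst : List Int) (ls : List Int) (out : List Int) : Prop := out = refine_list_alt lst ls
instance (lst : List Int) (ls : List Int) (out : List Int) : Decidable (Spec_refine_list lst ls out) := by unfold Spec_refine_list; infer_instance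

-- ===== CLAIM (what is proved, stated in full; the proofs are below) =====
def Claim_equal_refine_list : Prop := ∀ (lst : List Int) (ls : List Int), Dom_refine_list lst ls → Spec_refine_list lst ls (refine_list lst ls)

-- ===== LEMMAS AND PROOFS =====

-- Reference recursion: walk the list keeping the processed prefix `pre`; drop e when
-- e ∈ ls and e is not in the prefix (i.e. this is e's first occurrence).
def keepFrom (ls : List Int) : List Int → List Int → List Int
  | _, [] => []
  | pre, e :: rest =>
      if e ∈ ls ∧ e ∉ pre then keepFrom ls (pre ++ [e]) rest
      else e :: keepFrom ls (pre ++ [e]) rest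

lemma alt_eq_keepFrom (ls : List Int) :
    ∀ (suf pre out : List Int),
      (suf.foldl
        (fun (st : PySem.Set Int × List Int) e =>
          if e ∈ PySem.Set.ofList ls ∧ e ∉ st.1 then (PySem.Set.add st.1 e, st.2)
          else (st.1, st.2 ++ [e]))
        (PySem.Set.ofList (pre.filter (· ∈ ls)), out)).2
      = out ++ keepFrom ls pre suf := by
  intro suf
  induction suf with
  | nil => intro pre out; simp [keepFrom]
  | cons e rest ih =>
    intro pre out
    simp only [List.foldl_cons, keepFrom]
    have hfmem : e ∈ pre.filter (· ∈ ls) ↔ e ∈ pre ∧ e ∈ ls := by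
      simp [List.mem_filter]
    by_cases h1 : e ∈ ls
    · by_cases h2 : e ∈ pre
      · have hmem : e ∈ PySem.Set.ofList (pre.filter (· ∈ ls)) := by
          rw [PySem.Set.mem_ofList]; exact hfmem.mpr ⟨h2, h1⟩
        rw [if_neg (by simp [hmem]), if_neg (by simp [h2])]
        have hset : PySem.Set.ofList ((pre ++ [e]).filter (· ∈ ls))
            = PySem.Set.ofList (pre.filter (· ∈ ls)) := by
          rw [List.filter_append]
          simp only [List.filter_cons, List.filter_nil, decide_eq_true h1]
          rw [PySem.Set.ofList_eq_foldl, List.foldl_append, ← PySem.Set.ofList_eq_foldl]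
          simp [PySem.Set.add, hmem]
        have := ih (pre ++ [e]) (out ++ [e])
        rw [hset] at this
        rw [this]
        simp
      · have hmem : e ∉ PySem.Set.ofList (pre.filter (· ∈ ls)) := by
          rw [PySem.Set.mem_ofList, hfmem]; exact fun h => h2 h.1
        rw [if_pos ⟨(PySem.Set.mem_ofList ls e).mpr h1, hmem⟩, if_pos ⟨h1, h2⟩]
        have hset : PySem.Set.ofList ((pre ++ [e]).filter (· ∈ ls))
            = PySem.Set.add (PySem.Set.ofList (pre.filter (· ∈ ls))) e := by
          rw [List.filter_append]
          simp only [List.filter_cons, List.filter_nil, decide_eq_true h1]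
          rw [PySem.Set.ofList_eq_foldl, List.foldl_append, ← PySem.Set.ofList_eq_foldl]
          rfl
        have := ih (pre ++ [e]) out
        rw [hset] at this
        exact this
    · rw [if_neg (by simp [PySem.Set.mem_ofList, h1]), if_neg (by simp [h1])]
      have hset : (pre ++ [e]).filter (· ∈ ls) = pre.filter (· ∈ ls) := by
        rw [List.filter_append]
        simp [h1]
      have := ih (pre ++ [e]) (out ++ [e])
      rw [hset] at this
      rw [this]
      simp

lemma a_mem_iff (lst ls : List Int) (n : Nat) (hn : n < lst.length) :
    ((n : Int) ∈ lst.foldl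
      (fun acc e => if e ∈ ls then acc ++ [(((PySem.List.index? lst e).getD 0 : Nat) : Int)] else acc) [])
    ↔ (lst[n] ∈ ls ∧ lst[n] ∉ lst.take n) := by
  rw [PySem.List.foldl_append_ite (fun e => e ∈ ls)
    (fun e => (((PySem.List.index? lst e).getD 0 : Nat) : Int)) lst []]
  simp only [List.nil_append, List.mem_map, List.mem_filter, decide_eq_true_eq]
  constructor
  · rintro ⟨e, ⟨helst, hels⟩, hf⟩
    obtain ⟨k, hk⟩ : ∃ k, PySem.List.index? lst e = some k := by
      rcases h : PySem.List.index? lst e with _ | k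
      · exact absurd ((PySem.List.index?_eq_none_iff lst e).mp h) (by simp [helst])
      · exact ⟨k, rfl⟩
    rw [hk] at hf
    simp only [Option.getD_some, Int.natCast_inj] at hf
    subst hf
    obtain ⟨hlt, hget, hall⟩ := PySem.List.getElem_of_index?_eq_some hk
    refine ⟨hget ▸ hels, fun hmem => ?_⟩
    obtain ⟨j, hj, hje⟩ := List.mem_take_iff_getElem.mp hmem
    exact hall j (by omega) (by rw [hget] at hje; simpa using hje)
  · rintro ⟨hels, htake⟩
    refine ⟨lst[n], ⟨List.getElem_mem hn, hels⟩, ?_⟩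
    have hidx : PySem.List.index? lst lst[n] = some n := by
      rw [PySem.List.index?_eq_some_iff]
      exact ⟨lst.take n, lst.drop (n + 1),
        by rw [← List.drop_eq_getElem_cons hn, List.take_append_drop],
        by simp [List.length_take, Nat.min_eq_left hn.le], htake⟩
    rw [hidx]
    simp

lemma keep_eq_filterMap (ls lst : List Int) :
    ∀ (suf pre : List Int), lst = pre ++ suf →
      keepFrom ls pre suf
      = (List.range' pre.length suf.length).filterMap
          (fun n => if lst.getD n 0 ∈ ls ∧ lst.getD n 0 ∉ lst.take n then none else some (lst.getD n 0)) := by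
  intro suf
  induction suf with
  | nil => intro pre h; simp [keepFrom]
  | cons e rest ih =>
    intro pre h
    have hget : lst.getD pre.length 0 = e := by
      rw [h]; simp [List.getD_eq_getElem?_getD]
    have htake : lst.take pre.length = pre := by
      rw [h, List.take_left]
    have hih := ih (pre ++ [e]) (by rw [h]; simp)
    simp only [List.length_cons, List.range'_succ, List.filterMap_cons, hget, htake]
    by_cases hc : e ∈ ls ∧ e ∉ pre
    · rw [if_pos hc, keepFrom, if_pos hc, hih]
      simp
    · rw [if_neg hc, keepFrom, if_neg hc, hih]
      simp

lemma map_filter_eq_filterMap {a b : Type} (p : a → Bool) (f : a → b) (l : List a) :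
    (l.filter p).map f = l.filterMap (fun x => if p x then some (f x) else none) := by
  induction l with
  | nil => rfl
  | cons x xs ih =>
    rw [List.filter_cons, List.filterMap_cons]
    by_cases h : p x <;> simp [h, ih]

-- ===== VERDICT (by name: the statement is the Claim_ definition above) =====
theorem refine_list_spec : Claim_equal_refine_list := by
  intro lst ls _
  unfold Spec_refine_list
  have hB : refine_list_alt lst ls = keepFrom ls [] lst := by
    have h := alt_eq_keepFrom ls lst [] []
    simpa [refine_list_alt] using h
  rw [hB]
  show refine_list lst ls = keepFrom ls [] lst
  set Alist := lst.foldl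
    (fun acc e => if e ∈ ls then acc ++ [(((PySem.List.index? lst e).getD 0 : Nat) : Int)] else acc) []
    with hA
  have hports : refine_list lst ls
      = (PySem.List.pyRange 0 (lst.length : Int) 1).foldl
          (fun out i => if i ∈ Alist then out else out ++ [PySem.List.pyGetD lst i 0]) [] := rfl
  rw [hports, PySem.List.pyRange_zero_natCast, List.foldl_map]
  have hflip : (fun (out : List Int) (n : Nat) =>
        if ((n : Int)) ∈ Alist then out else out ++ [PySem.List.pyGetD lst (n : Int) 0])
      = (fun (out : List Int) (n : Nat) =>
        if ¬ ((n : Int)) ∈ Alist then out ++ [PySem.List.pyGetD lst (n : Int) 0] else out) := by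
    funext out n
    by_cases h : ((n : Int)) ∈ Alist <;> simp [h]
  rw [hflip, PySem.List.foldl_append_ite (fun (n : Nat) => ¬ ((n : Int)) ∈ Alist)
    (fun (n : Nat) => PySem.List.pyGetD lst (n : Int) 0) (List.range lst.length) []]
  rw [List.nil_append, map_filter_eq_filterMap]
  rw [keep_eq_filterMap ls lst lst [] (by simp), List.length_nil, ← List.range_eq_range']
  apply List.filterMap_congr
  intro n hn
  have hnlt : n < lst.length := List.mem_range.mp hn
  have hgd : lst.getD n 0 = lst[n] := List.getD_eq_getElem lst 0 hnlt
  have hmem := a_mem_iff lst ls n hnlt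
  rw [← hA] at hmem
  by_cases hc : lst[n] ∈ ls ∧ lst[n] ∉ lst.take n
  · have h1 : ((n : Int)) ∈ Alist := hmem.mpr hc
    simp [h1, hc, List.getElem?_eq_getElem hnlt]
  · have h1 : ((n : Int)) ∉ Alist := fun h => hc (hmem.mp h)
    simp [h1, hc, List.getElem?_eq_getElem hnlt]
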